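-- pv_equiv track=rewrite | github.com/DagyeongH/algorithm | 프로그래머스/lv0/120815. 피자 나눠 먹기 （2）/피자 나눠 먹기 （2）.py | solution
-- ===== SOURCE A (Python) =====
-- def solution(n):
--     # 6과 사람수 최소공배수
--     answer = 0
--     six = 6
--     if n % 6 == 0:
--         answer = n // 6
--     else:
--         answer = 1
--         for i in range(1, six + 1):
--             if n % i == 0 and six % i == 0:
--                 answer *= i
--                 n = n // i
--                 six = six // i
--         answer = (answer * n * six) // 6    # 피자 한 판 6조각
--
--     return answer
-- ===== SOURCE B (Python) =====
-- def solution(n):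
--     # gcd(n, 6) by the Euclidean algorithm, then n // gcd
--     a, b = n, 6
--     while b:
--         a, b = b, a % b
--     return n // a
-- ===== Notes on version B (the rewrite author's own statement) =====
-- stated objective: simpler
-- what changed: Replaces A's per-residue branch and trial-division loop over divisors 1..6 with an inline Euclidean gcd loop followed by a single floor division n // gcd(n, 6).
import Mathlib
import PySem

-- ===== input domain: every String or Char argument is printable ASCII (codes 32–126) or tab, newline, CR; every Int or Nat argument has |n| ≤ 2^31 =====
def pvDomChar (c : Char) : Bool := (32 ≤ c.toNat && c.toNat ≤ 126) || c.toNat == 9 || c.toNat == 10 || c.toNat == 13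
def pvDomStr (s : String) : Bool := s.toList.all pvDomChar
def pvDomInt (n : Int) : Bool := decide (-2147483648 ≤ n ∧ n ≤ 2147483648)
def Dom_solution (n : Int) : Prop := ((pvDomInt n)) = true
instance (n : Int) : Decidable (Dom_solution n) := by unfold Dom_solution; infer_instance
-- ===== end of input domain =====

-- B replaces A's trial-division loop over the divisors 1..6 with an inline Euclidean gcd followed by one floor division (objective: simpler).

-- ===== PORT A =====
-- the for-loop 'for i in range(1, six+1): …' over the state (answer, n, six)
def loopA : Int × Int × Int → List Int → Int × Int × Int
  | st, [] => st
  | (answer, m, six), i :: is =>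
      if PySem.Int.mod m i = 0 ∧ PySem.Int.mod six i = 0 then
        loopA (answer * i, PySem.Int.floordiv m i, PySem.Int.floordiv six i) is
      else loopA (answer, m, six) is

def solution (n : Int) : Int :=
  if PySem.Int.mod n 6 = 0 then
    PySem.Int.floordiv n 6
  else
    -- six = 6 when the range is built, so range(1, six + 1) = pyRange 1 7 1
    let st := loopA (1, n, 6) (PySem.List.pyRange 1 7 1)
    PySem.Int.floordiv (st.1 * st.2.1 * st.2.2) 6

-- ===== PORT B =====
-- 'a, b = n, 6; while b: a, b = b, a % b'
def gcdLoop (a b : Int) : Int :=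
  if h : b = 0 then a
  else gcdLoop b (PySem.Int.mod a b)
termination_by b.natAbs
decreasing_by
  rcases lt_or_gt_of_ne h with hb | hb
  · have := PySem.Int.mod_neg_bounds (a := a) hb; omega
  · have h1 := PySem.Int.mod_nonneg (a := a) hb
    have h2 := PySem.Int.mod_lt (a := a) hb
    omega

def solution_alt (n : Int) : Int :=
  PySem.Int.floordiv n (gcdLoop n 6)

-- ===== PRECONDITION & SPEC =====
def Spec_solution (n : Int) (out : Int) : Prop := out = solution_alt n
instance (n : Int) (out : Int) : Decidable (Spec_solution n out) := by unfold Spec_solution; infer_instance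

-- ===== CLAIM (what is proved, stated in full; the proofs are below) =====
def Claim_equal_solution : Prop := ∀ (n : Int), Dom_solution n → Spec_solution n (solution n)

-- ===== LEMMAS AND PROOFS =====

theorem pyRange16 : PySem.List.pyRange 1 7 1 = [1, 2, 3, 4, 5, 6] := by decide

theorem gcdLoop_zero (a : Int) : gcdLoop a 0 = a := by
  rw [gcdLoop]; simp

theorem gcdLoop_step (a b : Int) (h : b ≠ 0) :
    gcdLoop a b = gcdLoop b (PySem.Int.mod a b) := by
  rw [gcdLoop]; simp [h]

-- ===== VERDICT (by name: the statement is the Claim_ definition above) =====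
theorem solution_spec : Claim_equal_solution := by
  intro n _
  unfold Spec_solution solution_alt
  have hm : ∀ (a b : Int), 0 < b → PySem.Int.mod a b = a % b :=
    fun _ _ hb => PySem.Int.mod_eq_emod_of_pos hb
  have hd : ∀ (a b : Int), 0 < b → PySem.Int.floordiv a b = a / b :=
    fun _ _ hb => PySem.Int.floordiv_eq_ediv_of_pos hb
  have hg6 : gcdLoop n 6 = gcdLoop 6 (n % 6) := by
    rw [gcdLoop_step n 6 (by norm_num), hm _ _ (by norm_num)]
  have hr : n % 6 = 0 ∨ n % 6 = 1 ∨ n % 6 = 2 ∨ n % 6 = 3 ∨ n % 6 = 4 ∨ n % 6 = 5 := by omega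
  rcases hr with h | h | h | h | h | h
  · -- n % 6 = 0 : gcd = 6, both sides are n // 6
    have hg : gcdLoop n 6 = 6 := by rw [hg6, h, gcdLoop_zero]
    simp only [solution]
    rw [hm _ _ (by norm_num : (0:Int) < 6), h, if_pos rfl, hg]
  · -- n % 6 = 1 : gcd = 1
    have hg : gcdLoop n 6 = 1 := by
      rw [hg6, h, gcdLoop_step 6 1 (by norm_num), hm _ _ (by norm_num)]
      norm_num [gcdLoop_zero]
    have c2 : n % 2 = 1 := by omega
    have c3 : n % 3 = 1 := by omega
    have hl : loopA (1, n, 6) [1, 2, 3, 4, 5, 6] = (1, n, 6) := by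
      norm_num [loopA, hm _ _ (by norm_num : (0:Int) < 1), hm _ _ (by norm_num : (0:Int) < 2),
        hm _ _ (by norm_num : (0:Int) < 3), hm _ _ (by norm_num : (0:Int) < 4),
        hm _ _ (by norm_num : (0:Int) < 5), hm _ _ (by norm_num : (0:Int) < 6),
        hd _ _ (by norm_num : (0:Int) < 1), h, c2, c3]
    simp only [solution, pyRange16]
    rw [hm _ _ (by norm_num : (0:Int) < 6), h, if_neg (by norm_num), hl, hg,
      hd _ _ (by norm_num : (0:Int) < 6), hd _ _ (by norm_num : (0:Int) < 1)]
    norm_num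
  · -- n % 6 = 2 : gcd = 2
    have hg : gcdLoop n 6 = 2 := by
      rw [hg6, h, gcdLoop_step 6 2 (by norm_num), hm _ _ (by norm_num)]
      norm_num [gcdLoop_zero]
    have c2 : n % 2 = 0 := by omega
    have c3 : n / 2 % 3 = 1 := by omega
    have hl : loopA (1, n, 6) [1, 2, 3, 4, 5, 6] = (2, n / 2, 3) := by
      norm_num [loopA, hm _ _ (by norm_num : (0:Int) < 1), hm _ _ (by norm_num : (0:Int) < 2),
        hm _ _ (by norm_num : (0:Int) < 3), hm _ _ (by norm_num : (0:Int) < 4),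
        hm _ _ (by norm_num : (0:Int) < 5), hm _ _ (by norm_num : (0:Int) < 6),
        hd _ _ (by norm_num : (0:Int) < 1), hd _ _ (by norm_num : (0:Int) < 2),
        c2, c3]
    simp only [solution, pyRange16]
    rw [hm _ _ (by norm_num : (0:Int) < 6), h, if_neg (by norm_num), hl, hg,
      hd _ _ (by norm_num : (0:Int) < 6), hd _ _ (by norm_num : (0:Int) < 2)]
    norm_num
    omega
  · -- n % 6 = 3 : gcd = 3
    have hg : gcdLoop n 6 = 3 := by
      rw [hg6, h, gcdLoop_step 6 3 (by norm_num), hm _ _ (by norm_num)]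
      norm_num [gcdLoop_zero]
    have c2 : n % 2 = 1 := by omega
    have c3 : n % 3 = 0 := by omega
    have hl : loopA (1, n, 6) [1, 2, 3, 4, 5, 6] = (3, n / 3, 2) := by
      norm_num [loopA, hm _ _ (by norm_num : (0:Int) < 1), hm _ _ (by norm_num : (0:Int) < 2),
        hm _ _ (by norm_num : (0:Int) < 3), hm _ _ (by norm_num : (0:Int) < 4),
        hm _ _ (by norm_num : (0:Int) < 5), hm _ _ (by norm_num : (0:Int) < 6),
        hd _ _ (by norm_num : (0:Int) < 1), hd _ _ (by norm_num : (0:Int) < 3),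
        c2, c3]
    simp only [solution, pyRange16]
    rw [hm _ _ (by norm_num : (0:Int) < 6), h, if_neg (by norm_num), hl, hg,
      hd _ _ (by norm_num : (0:Int) < 6), hd _ _ (by norm_num : (0:Int) < 3)]
    norm_num
    omega
  · -- n % 6 = 4 : gcd = 2
    have hg : gcdLoop n 6 = 2 := by
      rw [hg6, h, gcdLoop_step 6 4 (by norm_num), hm _ _ (by norm_num)]
      norm_num
      rw [gcdLoop_step 4 2 (by norm_num), hm _ _ (by norm_num)]
      norm_num [gcdLoop_zero]
    have c2 : n % 2 = 0 := by omega
    have c3 : n / 2 % 3 = 2 := by omega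
    have hl : loopA (1, n, 6) [1, 2, 3, 4, 5, 6] = (2, n / 2, 3) := by
      norm_num [loopA, hm _ _ (by norm_num : (0:Int) < 1), hm _ _ (by norm_num : (0:Int) < 2),
        hm _ _ (by norm_num : (0:Int) < 3), hm _ _ (by norm_num : (0:Int) < 4),
        hm _ _ (by norm_num : (0:Int) < 5), hm _ _ (by norm_num : (0:Int) < 6),
        hd _ _ (by norm_num : (0:Int) < 1), hd _ _ (by norm_num : (0:Int) < 2),
        c2, c3]
    simp only [solution, pyRange16]
    rw [hm _ _ (by norm_num : (0:Int) < 6), h, if_neg (by norm_num), hl, hg,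
      hd _ _ (by norm_num : (0:Int) < 6), hd _ _ (by norm_num : (0:Int) < 2)]
    norm_num
    omega
  · -- n % 6 = 5 : gcd = 1
    have hg : gcdLoop n 6 = 1 := by
      rw [hg6, h, gcdLoop_step 6 5 (by norm_num), hm _ _ (by norm_num)]
      norm_num
      rw [gcdLoop_step 5 1 (by norm_num), hm _ _ (by norm_num)]
      norm_num [gcdLoop_zero]
    have c2 : n % 2 = 1 := by omega
    have c3 : n % 3 = 2 := by omega
    have hl : loopA (1, n, 6) [1, 2, 3, 4, 5, 6] = (1, n, 6) := by
      norm_num [loopA, hm _ _ (by norm_num : (0:Int) < 1), hm _ _ (by norm_num : (0:Int) < 2),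
        hm _ _ (by norm_num : (0:Int) < 3), hm _ _ (by norm_num : (0:Int) < 4),
        hm _ _ (by norm_num : (0:Int) < 5), hm _ _ (by norm_num : (0:Int) < 6),
        hd _ _ (by norm_num : (0:Int) < 1), h, c2, c3]
    simp only [solution, pyRange16]
    rw [hm _ _ (by norm_num : (0:Int) < 6), h, if_neg (by norm_num), hl, hg,
      hd _ _ (by norm_num : (0:Int) < 6), hd _ _ (by norm_num : (0:Int) < 1)]
    norm_num
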